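-- pv_equiv track=rewrite | github.com/JB11115/lgimapy | src/lgimapy/notebooks/interviews/interview_submissions/Tushar_Gupta.py | count_number_of_increasing_IDs
-- ===== SOURCE A (Python) =====
-- def count_number_of_increasing_IDs(fid):
--
--     count = 0
--     for ID in fid:
--
--         digits = []
--         for ch in ID:
--             if ch.isnumeric():
--                 digits.append(int(ch))
--         ind = 0
--
--         if len(digits) == 0:
--             ind = 1
--
--         for i in range(len(digits) - 1):
--             if digits[i] >= digits[i + 1]:
--                 ind = 1
--                 break
--
--         if ind == 0:
--             count += 1
--
--     return count
-- ===== SOURCE B (Python) =====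
-- def _strictly_increasing_digits(ID):
--     digits = [int(ch) for ch in ID if ch.isnumeric()]
--     return bool(digits) and digits == sorted(set(digits))
--
--
-- def count_number_of_increasing_IDs(fid):
--     return sum(map(_strictly_increasing_digits, fid))
-- ===== Notes on version B (the rewrite author's own statement) =====
-- stated objective: simpler
-- what changed: Replaces the index-based pairwise scan with early break and the 'ind' flag by a per-ID predicate that tests strict increase as 'digits == sorted(set(digits))' (guarded nonempty), summed over the IDs.
import Mathlib
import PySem

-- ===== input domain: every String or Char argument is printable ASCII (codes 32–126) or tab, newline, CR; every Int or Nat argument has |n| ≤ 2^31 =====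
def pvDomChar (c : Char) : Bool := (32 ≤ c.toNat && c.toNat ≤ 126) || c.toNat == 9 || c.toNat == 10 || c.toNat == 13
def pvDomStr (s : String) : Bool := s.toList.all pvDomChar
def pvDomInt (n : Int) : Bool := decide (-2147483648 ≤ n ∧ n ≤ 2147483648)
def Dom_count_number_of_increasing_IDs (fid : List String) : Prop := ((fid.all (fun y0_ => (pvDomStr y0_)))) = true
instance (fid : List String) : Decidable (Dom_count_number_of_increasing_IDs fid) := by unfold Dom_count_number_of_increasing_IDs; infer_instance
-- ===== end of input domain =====

-- B replaces A's flag-and-break pairwise index scan by the per-ID test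
-- 'digits == sorted(set(digits))' (guarded nonempty), summed over the IDs; objective: simpler.

-- ===== PORT A =====
-- ch.isnumeric() is exactly PySem.Chars.isdigit on the printable-ASCII domain;
-- int(ch) for such a digit ch is exactly (ch.toNat : Int) - 48.
def pvDigitsA (s : String) : List Int :=
  s.toList.foldl (fun acc c => if PySem.Chars.isdigit c then acc ++ [(c.toNat : Int) - 48] else acc) []

-- the 'for i in range(len(digits)-1): if digits[i] >= digits[i+1]: ind = 1; break' loop:
-- returns the final value of ind (starting from 0)
def pvIndLoop : List Int → Int
  | a :: b :: rest => if a ≥ b then 1 else pvIndLoop (b :: rest)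
  | _ => 0

def count_number_of_increasing_IDs (fid : List String) : Int :=
  fid.foldl (fun count ID =>
    let digits := pvDigitsA ID
    let ind : Int := if digits.length = 0 then 1 else pvIndLoop digits
    if ind = 0 then count + 1 else count) 0

-- ===== PORT B =====
def pvDigitsB (s : String) : List Int :=
  (s.toList.filter PySem.Chars.isdigit).map (fun c => (c.toNat : Int) - 48)

def pvStrictlyIncreasingDigits (s : String) : Bool :=
  let digits := pvDigitsB s
  decide (digits ≠ []) && decide (digits = PySem.List.sorted (PySem.Set.ofList digits) (fun x => x) false)

def count_number_of_increasing_IDs_alt (fid : List String) : Int :=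
  ((fid.countP pvStrictlyIncreasingDigits : Nat) : Int)

-- ===== PRECONDITION & SPEC =====
def Spec_count_number_of_increasing_IDs (fid : List String) (out : Int) : Prop := out = count_number_of_increasing_IDs_alt fid
instance (fid : List String) (out : Int) : Decidable (Spec_count_number_of_increasing_IDs fid out) := by unfold Spec_count_number_of_increasing_IDs; infer_instance

-- ===== CLAIM (what is proved, stated in full; the proofs are below) =====
def Claim_equal_count_number_of_increasing_IDs : Prop := ∀ (fid : List String), Dom_count_number_of_increasing_IDs fid → Spec_count_number_of_increasing_IDs fid (count_number_of_increasing_IDs fid)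

-- ===== LEMMAS AND PROOFS =====

-- the two digit extractions agree
lemma foldlDigits (cs : List Char) (acc : List Int) :
    cs.foldl (fun a c => if PySem.Chars.isdigit c then a ++ [(c.toNat : Int) - 48] else a) acc
      = acc ++ (cs.filter PySem.Chars.isdigit).map (fun c => (c.toNat : Int) - 48) := by
  induction cs generalizing acc with
  | nil => simp
  | cons c cs ih =>
    by_cases h : PySem.Chars.isdigit c
    · simp [List.foldl, h, ih]
    · simp [List.foldl, h, ih]

lemma digitsA_eq_digitsB (s : String) : pvDigitsA s = pvDigitsB s := by
  unfold pvDigitsA pvDigitsB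
  rw [foldlDigits]
  simp

lemma indLoop_zero_iff (d : List Int) : pvIndLoop d = 0 ↔ d.IsChain (· < ·) := by
  induction d with
  | nil => simp [pvIndLoop]
  | cons a t ih =>
    cases t with
    | nil => simp [pvIndLoop]
    | cons b r =>
      by_cases h : a ≥ b
      · simp only [pvIndLoop, if_pos h, List.isChain_cons_cons]
        constructor
        · intro hc; omega
        · rintro ⟨hab, -⟩; omega
      · simp only [pvIndLoop, if_neg h, List.isChain_cons_cons, ih]
        constructor
        · intro hc; exact ⟨by omega, hc⟩
        · rintro ⟨-, hc⟩; exact hc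

lemma sorted_set_eq_iff (d : List Int) :
    (d = PySem.List.sorted (PySem.Set.ofList d) (fun x => x) false) ↔ d.Pairwise (· < ·) := by
  constructor
  · intro h
    rw [h]
    exact PySem.List.sorted_ofList_pairwise_lt d
  · intro hp
    have hnd : d.Nodup := hp.nodup
    have hself : PySem.Set.ofList d = d := PySem.Set.ofList_eq_self_of_nodup d hnd
    rw [hself]
    exact (PySem.List.sorted_eq_of_perm_of_pairwise_lt d d (fun x => x) (List.Perm.refl d) hp).symm

lemma per_id (s : String) :
    (if (pvDigitsA s).length = 0 then (1 : Int) else pvIndLoop (pvDigitsA s)) = 0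
      ↔ pvStrictlyIncreasingDigits s = true := by
  unfold pvStrictlyIncreasingDigits
  rw [digitsA_eq_digitsB]
  set d := pvDigitsB s with hd
  by_cases hnil : d = []
  · simp [hnil]
  · have : d.length ≠ 0 := by simpa [List.length_eq_zero_iff] using hnil
    simp [this, hnil, indLoop_zero_iff, sorted_set_eq_iff, List.isChain_iff_pairwise]

lemma foldl_count (fid : List String) (n : Int) :
    fid.foldl (fun count ID =>
      let digits := pvDigitsA ID
      let ind : Int := if digits.length = 0 then 1 else pvIndLoop digits
      if ind = 0 then count + 1 else count) n
    = n + ((fid.countP pvStrictlyIncreasingDigits : Nat) : Int) := by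
  induction fid generalizing n with
  | nil => simp
  | cons s t ih =>
    simp only [List.foldl, List.countP_cons]
    by_cases h : pvStrictlyIncreasingDigits s = true
    · rw [if_pos ((per_id s).2 h)]
      rw [ih]
      simp [h]
      omega
    · rw [if_neg (fun hz => h ((per_id s).1 hz))]
      rw [ih]
      simp [h]

-- ===== VERDICT (by name: the statement is the Claim_ definition above) =====
theorem count_number_of_increasing_IDs_spec : Claim_equal_count_number_of_increasing_IDs := by
  intro fid _
  show _ = _
  unfold count_number_of_increasing_IDs count_number_of_increasing_IDs_alt
  simpa using foldl_count fid 0
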